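-- pv_equiv track=rewrite | github.com/bischoff-m/puzzle-solver | main.py | _border_coords_clockwise
-- ===== SOURCE A (Python) =====
-- Cell = tuple[int, int]
--
-- def _border_coords_clockwise(width: int, height: int) -> list[Cell]:
--     """Clockwise border coordinates starting at top-left corner.
--
--     Ordering:
--       - Top row: (0,0) .. (w-1,0)
--       - Right col: (w-1,1) .. (w-1,h-2)
--       - Bottom row: (w-1,h-1) .. (0,h-1)
--       - Left col: (0,h-2) .. (0,1)
--     """
--     if width < 2 or height < 2:
--         raise ValueError("width and height must be >= 2")
--     coords: list[Cell] = []
--     coords.extend((x, 0) for x in range(width))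
--     coords.extend((width - 1, y) for y in range(1, height - 1))
--     coords.extend((x, height - 1) for x in range(width - 1, -1, -1))
--     coords.extend((0, y) for y in range(height - 2, 0, -1))
--     return coords
-- ===== SOURCE B (Python) =====
-- def _border_coords_clockwise(width: int, height: int) -> list:
--     """Closed-form: map each perimeter index i to its coordinate directly."""
--     if width < 2 or height < 2:
--         raise ValueError("width and height must be >= 2")
--     w, h = width, height
--     coords = []
--     for i in range(2 * w + 2 * h - 4):
--         if i < w:
--             coords.append((i, 0))
--         elif i < w + h - 2:
--             coords.append((w - 1, i - w + 1))
--         elif i < 2 * w + h - 2: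
--             coords.append((2 * w + h - 3 - i, h - 1))
--         else:
--             coords.append((0, 2 * w + 2 * h - 4 - i))
--     return coords
-- ===== Notes on version B (the rewrite author's own statement) =====
-- stated objective: alternative
-- what changed: Replaces A's four separate range-comprehension extends (top, right, bottom-reversed, left-reversed) with a single pass over the 2*w+2*h-4 perimeter indices, computing each coordinate from its index by a closed-form piecewise formula.
import Mathlib
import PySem

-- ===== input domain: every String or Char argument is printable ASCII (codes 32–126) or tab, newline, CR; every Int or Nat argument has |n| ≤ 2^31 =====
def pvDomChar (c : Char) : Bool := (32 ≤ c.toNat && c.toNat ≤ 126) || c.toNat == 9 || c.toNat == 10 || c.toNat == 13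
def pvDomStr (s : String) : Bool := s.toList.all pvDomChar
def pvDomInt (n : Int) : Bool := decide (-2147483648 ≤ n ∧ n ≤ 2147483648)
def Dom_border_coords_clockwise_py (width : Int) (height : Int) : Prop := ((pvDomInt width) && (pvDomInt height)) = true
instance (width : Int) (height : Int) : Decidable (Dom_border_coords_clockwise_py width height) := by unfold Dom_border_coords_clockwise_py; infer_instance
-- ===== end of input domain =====

-- B replaces A's four separate range-extends by one pass over the perimeter indices with a
-- closed-form index→coordinate formula (alternative decomposition, same cost).

-- ===== PORT A =====
-- four segments built by range comprehensions and extended in order, as in the Python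
def border_coords_clockwise_py (width : Int) (height : Int) : List (Int × Int) :=
  let coords : List (Int × Int) := []
  let coords := coords ++ (PySem.List.pyRange 0 width 1).map (fun x => (x, (0 : Int)))
  let coords := coords ++ (PySem.List.pyRange 1 (height - 1) 1).map (fun y => (width - 1, y))
  let coords := coords ++ (PySem.List.pyRange (width - 1) (-1) (-1)).map (fun x => (x, height - 1))
  let coords := coords ++ (PySem.List.pyRange (height - 2) 0 (-1)).map (fun y => ((0 : Int), y))
  coords

-- ===== PORT B =====
-- single loop over range(2*w+2*h-4), appending the coordinate computed from the index
def border_coords_clockwise_py_alt (width : Int) (height : Int) : List (Int × Int) :=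
  (PySem.List.pyRange 0 (2 * width + 2 * height - 4) 1).foldl
    (fun coords i =>
      coords ++ [if i < width then (i, (0 : Int))
        else if i < width + height - 2 then (width - 1, i - width + 1)
        else if i < 2 * width + height - 2 then (2 * width + height - 3 - i, height - 1)
        else ((0 : Int), 2 * width + 2 * height - 4 - i)])
    []

-- ===== PRECONDITION & SPEC =====
-- A raises ValueError when width < 2 or height < 2; those inputs are excluded.
def Pre_border_coords_clockwise_py (width : Int) (height : Int) : Prop := 2 ≤ width ∧ 2 ≤ height
instance (width : Int) (height : Int) : Decidable (Pre_border_coords_clockwise_py width height) := by unfold Pre_border_coords_clockwise_py; infer_instance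
def pvWitness_border_coords_clockwise_py : Int × Int := (3, 2)

def Spec_border_coords_clockwise_py (width : Int) (height : Int) (out : List (Int × Int)) : Prop := out = border_coords_clockwise_py_alt width height
instance (width : Int) (height : Int) (out : List (Int × Int)) : Decidable (Spec_border_coords_clockwise_py width height out) := by unfold Spec_border_coords_clockwise_py; infer_instance

-- ===== CLAIM (what is proved, stated in full; the proofs are below) =====
def Claim_equal_border_coords_clockwise_py : Prop := ∀ (width : Int) (height : Int), Dom_border_coords_clockwise_py width height → Pre_border_coords_clockwise_py width height → Spec_border_coords_clockwise_py width height (border_coords_clockwise_py width height)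

-- ===== LEMMAS AND PROOFS =====

theorem pv_foldl_push {α β : Type} (f : α → β) (l : List α) (acc : List β) :
    l.foldl (fun a i => a ++ [f i]) acc = acc ++ l.map f := by
  induction l generalizing acc with
  | nil => simp
  | cons x xs ih => simp [ih]

theorem pv_key (m n : ℕ) :
    border_coords_clockwise_py ((m : Int) + 2) ((n : Int) + 2)
      = border_coords_clockwise_py_alt ((m : Int) + 2) ((n : Int) + 2) := by
  unfold border_coords_clockwise_py border_coords_clockwise_py_alt
  rw [pv_foldl_push]
  rw [PySem.List.pyRange_one 0 ((m : Int) + 2), PySem.List.pyRange_one 1,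
      PySem.List.pyRange_one 0 (2 * ((m : Int) + 2) + 2 * ((n : Int) + 2) - 4),
      PySem.List.pyRange_neg_one ((m : Int) + 2 - 1), PySem.List.pyRange_neg_one ((n : Int) + 2 - 2)]
  have e1 : (((m : Int) + 2) - 0).toNat = m + 2 := by omega
  have e2 : (((n : Int) + 2 - 1) - 1).toNat = n := by omega
  have e3 : (((m : Int) + 2 - 1) - (-1)).toNat = m + 2 := by omega
  have e4 : (((n : Int) + 2 - 2) - 0).toNat = n := by omega
  have e5 : ((2 * ((m : Int) + 2) + 2 * ((n : Int) + 2) - 4) - 0).toNat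
      = (m + 2) + (n + ((m + 2) + n)) := by omega
  rw [e1, e2, e3, e4, e5,
      @List.range_add (m + 2) (n + ((m + 2) + n)),
      @List.range_add n ((m + 2) + n),
      @List.range_add (m + 2) n]
  simp only [List.map_append, List.map_map, List.nil_append, List.append_assoc]
  congr 1
  · apply List.map_congr_left
    intro k hk
    simp only [List.mem_range] at hk
    simp only [Function.comp]
    split_ifs <;> simp only [Prod.mk.injEq, true_and, and_true] <;> omega
  congr 1
  · apply List.map_congr_left
    intro k hk
    simp only [List.mem_range] at hk
    simp only [Function.comp]
    split_ifs <;> simp only [Prod.mk.injEq, true_and, and_true] <;> omega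
  congr 1
  · apply List.map_congr_left
    intro k hk
    simp only [List.mem_range] at hk
    simp only [Function.comp]
    split_ifs <;> simp only [Prod.mk.injEq, true_and, and_true] <;> omega
  · apply List.map_congr_left
    intro k hk
    simp only [List.mem_range] at hk
    simp only [Function.comp]
    split_ifs <;> simp only [Prod.mk.injEq, true_and, and_true] <;> omega

-- ===== VERDICT (by name: the statement is the Claim_ definition above) =====
theorem border_coords_clockwise_py_spec : Claim_equal_border_coords_clockwise_py := by
  intro width height _ hpre
  obtain ⟨hw, hh⟩ := hpre
  obtain ⟨m, hm⟩ : ∃ m : ℕ, width = (m : Int) + 2 := ⟨(width - 2).toNat, by omega⟩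
  obtain ⟨n, hn⟩ : ∃ n : ℕ, height = (n : Int) + 2 := ⟨(height - 2).toNat, by omega⟩
  subst hm hn
  exact pv_key m n
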